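-- pv_equiv track=rewrite | github.com/JONAHKYAGABA/MASTERS-WORK | training/metrics.py | _get_head_indices
-- ===== SOURCE A (Python) =====
-- from typing import Dict, List, Any, Optional, Tuple
--
-- def _get_head_indices(question_types: List[str]) -> Dict[str, List[int]]:
--     """Map question types to answer heads."""
--     head_indices = {'binary': [], 'category': [], 'region': [], 'severity': []}
--
--     binary_keywords = ['abnormal', 'normal', 'has_', 'is_']
--     region_keywords = ['where', 'describe_region', 'location']
--     severity_keywords = ['severe', 'severity']
--
--     for idx, q_type in enumerate(question_types):
--         q_lower = q_type.lower()
--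
--         if any(k in q_lower for k in severity_keywords):
--             head_indices['severity'].append(idx)
--         elif any(k in q_lower for k in region_keywords):
--             head_indices['region'].append(idx)
--         elif any(k in q_lower for k in binary_keywords):
--             head_indices['binary'].append(idx)
--         else:
--             head_indices['category'].append(idx)
--
--     return head_indices
-- ===== SOURCE B (Python) =====
-- from typing import Dict, List
--
-- def _get_head_indices(question_types: List[str]) -> Dict[str, List[int]]:
--     """Map question types to answer heads (bucket-major staged passes)."""
--     lows = [q.lower() for q in question_types]
--
--     def hits(keywords):
--         return [i for i, l in enumerate(lows) if any(k in l for k in keywords)]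
--
--     sev = hits(['severe', 'severity'])
--     reg = [i for i in hits(['where', 'describe_region', 'location']) if i not in sev]
--     binr = [i for i in hits(['abnormal', 'normal', 'has_', 'is_'])
--             if i not in sev and i not in reg]
--     cat = [i for i in range(len(lows))
--            if i not in sev and i not in reg and i not in binr]
--     return {'binary': binr, 'category': cat, 'region': reg, 'severity': sev}
-- ===== Notes on version B (the rewrite author's own statement) =====
-- stated objective: alternative
-- what changed: A's element-major single pass with an if/elif ladder mutating a dict is replaced by a bucket-major design: one pass per keyword group collects its matching index list, priority is resolved by subtracting earlier buckets' index lists, and the category bucket is the remaining indices of range(n).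
import Mathlib
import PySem

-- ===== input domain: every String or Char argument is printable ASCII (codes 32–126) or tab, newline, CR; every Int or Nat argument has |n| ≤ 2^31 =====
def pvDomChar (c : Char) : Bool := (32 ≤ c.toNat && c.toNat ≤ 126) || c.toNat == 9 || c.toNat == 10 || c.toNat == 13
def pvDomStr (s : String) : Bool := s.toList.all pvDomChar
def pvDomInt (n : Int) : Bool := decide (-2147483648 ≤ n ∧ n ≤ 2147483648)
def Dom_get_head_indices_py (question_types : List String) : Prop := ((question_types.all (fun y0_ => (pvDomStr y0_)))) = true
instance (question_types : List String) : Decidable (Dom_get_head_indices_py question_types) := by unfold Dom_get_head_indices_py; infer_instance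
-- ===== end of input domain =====

-- B replaces A's element-major single pass (if/elif ladder mutating a dict) by a bucket-major
-- design: per keyword group collect the matching index list, resolve priority by subtracting
-- earlier buckets' lists, category = remaining indices of range(n) (objective: alternative).

-- ===== PORT A =====
def get_head_indices_py (question_types : List String) : List (String × List Int) :=
  let head_indices : PySem.Dict String (List Int) :=
    PySem.Dict.ofList [("binary", []), ("category", []), ("region", []), ("severity", [])]
  let binary_keywords : List String := ["abnormal", "normal", "has_", "is_"]
  let region_keywords : List String := ["where", "describe_region", "location"]
  let severity_keywords : List String := ["severe", "severity"]
  let final := (PySem.List.enumerate question_types 0).foldl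
    (fun d p =>
      let q_lower := PySem.Str.lower p.2
      if severity_keywords.any (fun k => PySem.Str.isIn k q_lower) then
        d.modify "severity" [] (· ++ [p.1])
      else if region_keywords.any (fun k => PySem.Str.isIn k q_lower) then
        d.modify "region" [] (· ++ [p.1])
      else if binary_keywords.any (fun k => PySem.Str.isIn k q_lower) then
        d.modify "binary" [] (· ++ [p.1])
      else
        d.modify "category" [] (· ++ [p.1]))
    head_indices
  final.items

-- ===== PORT B =====
-- Source B's 'hits' helper: indices whose lowered string contains any of the keywords
def pvHits (lows : List String) (keywords : List String) : List Int :=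
  ((PySem.List.enumerate lows 0).filter
    (fun p => keywords.any (fun k => PySem.Str.isIn k p.2))).map (·.1)

def get_head_indices_py_alt (question_types : List String) : List (String × List Int) :=
  let lows := question_types.map PySem.Str.lower
  let sev := pvHits lows ["severe", "severity"]
  let reg := (pvHits lows ["where", "describe_region", "location"]).filter
    (fun i => !(sev.contains i))
  let binr := (pvHits lows ["abnormal", "normal", "has_", "is_"]).filter
    (fun i => !(sev.contains i) && !(reg.contains i))
  let cat := (PySem.List.pyRange 0 (lows.length : Int) 1).filter
    (fun i => !(sev.contains i) && !(reg.contains i) && !(binr.contains i))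
  [("binary", binr), ("category", cat), ("region", reg), ("severity", sev)]

-- ===== PRECONDITION & SPEC =====
def Spec_get_head_indices_py (question_types : List String) (out : List (String × List Int)) : Prop := out = get_head_indices_py_alt question_types
instance (question_types : List String) (out : List (String × List Int)) : Decidable (Spec_get_head_indices_py question_types out) := by unfold Spec_get_head_indices_py; infer_instance

-- ===== CLAIM (what is proved, stated in full; the proofs are below) =====
def Claim_equal_get_head_indices_py : Prop := ∀ (question_types : List String), Dom_get_head_indices_py question_types → Spec_get_head_indices_py question_types (get_head_indices_py question_types)

-- ===== LEMMAS AND PROOFS =====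

-- the three keyword tests of A's ladder, on an enumerated pair
def pvSb (p : Int × String) : Bool :=
  (["severe", "severity"] : List String).any (fun k => PySem.Str.isIn k (PySem.Str.lower p.2))
def pvRb (p : Int × String) : Bool :=
  (["where", "describe_region", "location"] : List String).any (fun k => PySem.Str.isIn k (PySem.Str.lower p.2))
def pvBb (p : Int × String) : Bool :=
  (["abnormal", "normal", "has_", "is_"] : List String).any (fun k => PySem.Str.isIn k (PySem.Str.lower p.2))

-- the body of A's loop, named for the proofs (definitionally equal to the inline lambda)
def pvStepA (d : PySem.Dict String (List Int)) (p : Int × String) : PySem.Dict String (List Int) :=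
  if pvSb p then d.modify "severity" [] (· ++ [p.1])
  else if pvRb p then d.modify "region" [] (· ++ [p.1])
  else if pvBb p then d.modify "binary" [] (· ++ [p.1])
  else d.modify "category" [] (· ++ [p.1])

def pvMk (B C R S : List Int) : PySem.Dict String (List Int) :=
  PySem.Dict.mk [("binary", B), ("category", C), ("region", R), ("severity", S)]

-- the loop invariant of A's fold, for an arbitrary 4-bucket state
theorem fold_invariant (qs : List String) (i : Int) (B C R S : List Int) :
    ((PySem.List.enumerate qs i).foldl pvStepA (pvMk B C R S)).items
    = [("binary", B ++ ((PySem.List.enumerate qs i).filter (fun p => !pvSb p && !pvRb p && pvBb p)).map (·.1)),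
       ("category", C ++ ((PySem.List.enumerate qs i).filter (fun p => !pvSb p && !pvRb p && !pvBb p)).map (·.1)),
       ("region", R ++ ((PySem.List.enumerate qs i).filter (fun p => !pvSb p && pvRb p)).map (·.1)),
       ("severity", S ++ ((PySem.List.enumerate qs i).filter (fun p => pvSb p)).map (·.1))] := by
  induction qs generalizing i B C R S with
  | nil => simp [PySem.List.enumerate_nil, pvMk]
  | cons q qs ih =>
    rw [PySem.List.enumerate_cons]
    simp only [List.foldl_cons, List.filter_cons]
    by_cases hs : pvSb (i, q) = true
    · have hstep : pvStepA (pvMk B C R S) (i, q) = pvMk B C R (S ++ [i]) := by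
        unfold pvStepA pvMk; rw [if_pos hs]; rfl
      rw [hstep, ih]; simp [hs]
    · rw [Bool.not_eq_true] at hs
      by_cases hr : pvRb (i, q) = true
      · have hstep : pvStepA (pvMk B C R S) (i, q) = pvMk B C (R ++ [i]) S := by
          unfold pvStepA pvMk
          rw [if_neg (by simp only [hs, Bool.false_eq_true, not_false_eq_true]), if_pos hr]; rfl
        rw [hstep, ih]; simp [hs, hr]
      · rw [Bool.not_eq_true] at hr
        by_cases hb : pvBb (i, q) = true
        · have hstep : pvStepA (pvMk B C R S) (i, q) = pvMk (B ++ [i]) C R S := by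
            unfold pvStepA pvMk
            rw [if_neg (by simp only [hs, Bool.false_eq_true, not_false_eq_true]),
                if_neg (by simp only [hr, Bool.false_eq_true, not_false_eq_true]), if_pos hb]; rfl
          rw [hstep, ih]; simp [hs, hr, hb]
        · rw [Bool.not_eq_true] at hb
          have hstep : pvStepA (pvMk B C R S) (i, q) = pvMk B (C ++ [i]) R S := by
            unfold pvStepA pvMk
            rw [if_neg (by simp only [hs, Bool.false_eq_true, not_false_eq_true]),
                if_neg (by simp only [hr, Bool.false_eq_true, not_false_eq_true]),
                if_neg (by simp only [hb, Bool.false_eq_true, not_false_eq_true])]; rfl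
          rw [hstep, ih]; simp [hs, hr, hb]

theorem pvEnumMap (f : String → String) (qs : List String) (i : Int) :
    PySem.List.enumerate (qs.map f) i = (PySem.List.enumerate qs i).map (fun p => (p.1, f p.2)) := by
  induction qs generalizing i with
  | nil => simp [PySem.List.enumerate_nil]
  | cons q qs ih => simp [PySem.List.enumerate_cons, ih]

-- pvHits on the lowered list, characterised as a filter over the raw enumeration
theorem pvHits_eq (qs kws : List String) :
    pvHits (qs.map PySem.Str.lower) kws
    = ((PySem.List.enumerate qs 0).filter
        (fun p => kws.any (fun k => PySem.Str.isIn k (PySem.Str.lower p.2)))).map (·.1) := by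
  unfold pvHits
  rw [pvEnumMap, List.filter_map, List.map_map]
  rfl

-- the enumeration's first components are the range 0..n-1, hence distinct
theorem pvNodupFst (qs : List String) :
    ((PySem.List.enumerate qs 0).map (·.1)).Nodup := by
  rw [PySem.List.map_fst_enumerate]
  exact PySem.List.nodup_pyRange_one _ _

theorem contains_fst_filter (qs : List String) (P : Int × String → Bool)
    (p : Int × String) (hp : p ∈ PySem.List.enumerate qs 0) :
    ((((PySem.List.enumerate qs 0).filter P).map (·.1)).contains p.1) = P p := by
  cases hP : P p with
  | true =>
    have : p.1 ∈ ((PySem.List.enumerate qs 0).filter P).map (·.1) :=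
      List.mem_map_of_mem (List.mem_filter.mpr ⟨hp, hP⟩)
    simpa using this
  | false =>
    have : p.1 ∉ ((PySem.List.enumerate qs 0).filter P).map (·.1) := by
      intro hmem
      rcases List.mem_map.mp hmem with ⟨r, hr, hfst⟩
      have hrE : r ∈ PySem.List.enumerate qs 0 := (List.mem_filter.mp hr).1
      have hrP : P r = true := (List.mem_filter.mp hr).2
      have hinj := List.inj_on_of_nodup_map (pvNodupFst qs)
      have : r = p := hinj hrE hp hfst
      rw [this, hP] at hrP; exact Bool.false_ne_true hrP
    simpa using this


-- B's value, characterised by the same filters as A's invariant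
theorem alt_eq (qs : List String) :
    get_head_indices_py_alt qs
    = [("binary", ((PySem.List.enumerate qs 0).filter (fun p => !pvSb p && !pvRb p && pvBb p)).map (·.1)),
       ("category", ((PySem.List.enumerate qs 0).filter (fun p => !pvSb p && !pvRb p && !pvBb p)).map (·.1)),
       ("region", ((PySem.List.enumerate qs 0).filter (fun p => !pvSb p && pvRb p)).map (·.1)),
       ("severity", ((PySem.List.enumerate qs 0).filter (fun p => pvSb p)).map (·.1))] := by
  unfold get_head_indices_py_alt
  simp only [pvHits_eq]
  rw [show (fun p : Int × String => (["severe", "severity"] : List String).any (fun k => PySem.Str.isIn k (PySem.Str.lower p.2))) = fun p => pvSb p from rfl,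
     show (fun p : Int × String => (["where", "describe_region", "location"] : List String).any (fun k => PySem.Str.isIn k (PySem.Str.lower p.2))) = fun p => pvRb p from rfl,
     show (fun p : Int × String => (["abnormal", "normal", "has_", "is_"] : List String).any (fun k => PySem.Str.isIn k (PySem.Str.lower p.2))) = fun p => pvBb p from rfl]
  have hreg : (((PySem.List.enumerate qs 0).filter (fun p => pvRb p)).map (·.1)).filter
        (fun i => !((((PySem.List.enumerate qs 0).filter (fun p => pvSb p)).map (·.1)).contains i))
      = ((PySem.List.enumerate qs 0).filter (fun p => !pvSb p && pvRb p)).map (·.1) := by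
    rw [List.filter_map, List.filter_filter]
    refine congrArg (List.map (fun x : Int × String => x.1)) (List.filter_congr ?_)
    intro p hp
    simp only [Function.comp]
    rw [contains_fst_filter qs (fun p => pvSb p) p hp]
  rw [hreg]
  have hbin : (((PySem.List.enumerate qs 0).filter (fun p => pvBb p)).map (·.1)).filter
        (fun i => !((((PySem.List.enumerate qs 0).filter (fun p => pvSb p)).map (·.1)).contains i)
               && !((((PySem.List.enumerate qs 0).filter (fun p => !pvSb p && pvRb p)).map (·.1)).contains i))
      = ((PySem.List.enumerate qs 0).filter (fun p => !pvSb p && !pvRb p && pvBb p)).map (·.1) := by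
    rw [List.filter_map, List.filter_filter]
    refine congrArg (List.map (fun x : Int × String => x.1)) (List.filter_congr ?_)
    intro p hp
    simp only [Function.comp]
    rw [contains_fst_filter qs (fun p => pvSb p) p hp,
        contains_fst_filter qs (fun p => !pvSb p && pvRb p) p hp]
    cases pvSb p <;> cases pvRb p <;> cases pvBb p <;> rfl
  rw [hbin]
  have hrange : PySem.List.pyRange 0 (((qs.map PySem.Str.lower).length : Int)) 1
      = (PySem.List.enumerate qs 0).map (·.1) := by
    rw [PySem.List.map_fst_enumerate]
    simp
  rw [hrange]
  have hcat : ((PySem.List.enumerate qs 0).map (·.1)).filter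
        (fun i => !((((PySem.List.enumerate qs 0).filter (fun p => pvSb p)).map (·.1)).contains i)
               && !((((PySem.List.enumerate qs 0).filter (fun p => !pvSb p && pvRb p)).map (·.1)).contains i)
               && !((((PySem.List.enumerate qs 0).filter (fun p => !pvSb p && !pvRb p && pvBb p)).map (·.1)).contains i))
      = ((PySem.List.enumerate qs 0).filter (fun p => !pvSb p && !pvRb p && !pvBb p)).map (·.1) := by
    rw [List.filter_map]
    refine congrArg (List.map (fun x : Int × String => x.1)) (List.filter_congr ?_)
    intro p hp
    simp only [Function.comp]
    rw [contains_fst_filter qs (fun p => pvSb p) p hp,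
        contains_fst_filter qs (fun p => !pvSb p && pvRb p) p hp,
        contains_fst_filter qs (fun p => !pvSb p && !pvRb p && pvBb p) p hp]
    cases pvSb p <;> cases pvRb p <;> cases pvBb p <;> rfl
  rw [hcat]

-- ===== VERDICT (by name: the statement is the Claim_ definition above) =====
theorem get_head_indices_py_spec : Claim_equal_get_head_indices_py := by
  intro qs _
  unfold Spec_get_head_indices_py
  show ((PySem.List.enumerate qs 0).foldl pvStepA (pvMk [] [] [] [])).items
      = get_head_indices_py_alt qs
  rw [fold_invariant, alt_eq]
  simp
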